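-- pv_equiv track=rewrite | github.com/gaestu/SurfSifter | src/extractors/browser/ie_legacy/_patterns.py | extract_user_from_path
-- ===== SOURCE A (Python) =====
-- def extract_user_from_path(file_path: str) -> str:
--     """
--     Extract username from a file path.
--
--     Args:
--         file_path: Logical path from evidence filesystem
--
--     Returns:
--         Username or "SYSTEM" for system profile
--     """
--     # Normalize path separators
--     path = file_path.replace("\\", "/")
--
--     # System profile
--     if "config/systemprofile" in path.lower():
--         return "SYSTEM"
--
--     # Check for Users/<username>/
--     parts = path.split("/")
--     for i, part in enumerate(parts):
--         if part.lower() == "users" and i + 1 < len(parts):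
--             return parts[i + 1]
--
--     return "Unknown"
-- ===== SOURCE B (Python) =====
-- def extract_user_from_path(file_path: str) -> str:
--     """Extract username from a file path (partition-based single scan, no split list)."""
--     path = file_path.replace("\\", "/")
--
--     if "config/systemprofile" in path.lower():
--         return "SYSTEM"
--
--     comp, sep, rest = path.partition("/")
--     while sep:
--         if comp.lower() == "users":
--             return rest.partition("/")[0]
--         comp, sep, rest = rest.partition("/")
--     return "Unknown"
-- ===== Notes on version B (the rewrite author's own statement) =====
-- stated objective: alternative
-- what changed: Replaces split-into-a-list plus index-based enumerate scan (with parts[i+1] lookups) by a single partition-driven sweep over the string that never materialises the component list.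
import Mathlib
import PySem

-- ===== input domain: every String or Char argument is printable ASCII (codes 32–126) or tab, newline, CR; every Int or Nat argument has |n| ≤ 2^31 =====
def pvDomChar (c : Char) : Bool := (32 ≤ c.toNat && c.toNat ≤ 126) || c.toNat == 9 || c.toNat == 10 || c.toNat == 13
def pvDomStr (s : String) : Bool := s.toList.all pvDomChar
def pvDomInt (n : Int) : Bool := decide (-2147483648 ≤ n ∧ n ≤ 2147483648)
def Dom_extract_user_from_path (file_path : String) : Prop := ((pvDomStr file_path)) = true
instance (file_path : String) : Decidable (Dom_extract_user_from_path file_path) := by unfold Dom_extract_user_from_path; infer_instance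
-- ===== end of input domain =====

-- B replaces A's split-into-a-list + index-based enumerate scan by a single partition-driven
-- sweep over the string (objective: alternative decomposition, same cost).

-- ===== PORT A =====
-- the 'for i, part in enumerate(parts): …' loop with its early return, carrying the full
-- parts list for the parts[i+1] lookup; pyGetD's default is never used (guard i+1 < len)
def pvALoop (parts : List String) : List (Int × String) → String
  | [] => "Unknown"
  | (i, part) :: rest =>
      if PySem.Str.lower part = "users" ∧ i + 1 < (parts.length : Int) then
        PySem.List.pyGetD parts (i + 1) ""
      else pvALoop parts rest

def extract_user_from_path (file_path : String) : String :=
  let path := PySem.Str.replace file_path "\\" "/"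
  if PySem.Str.isIn "config/systemprofile" (PySem.Str.lower path) then "SYSTEM"
  else
    -- path.split("/") with the nonempty literal separator "/" is exactly Chars.splitOn
    let parts := (PySem.Chars.splitOn path.toList ['/']).map String.ofList
    pvALoop parts (PySem.List.enumerate parts 0)

-- ===== PORT B =====
-- the 'while sep:' loop over successive partitions; str.partition("/") is ported by hand as
-- (takeWhile (≠ '/'), first char of dropWhile, rest of dropWhile), exact for a 1-char separator
def pvBLoop (path : List Char) : String :=
  match h : path.dropWhile (· ≠ '/') with
  | [] => "Unknown"                                   -- sep == "" : fall out of the while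
  | _ :: rest =>
      if PySem.Chars.lower (path.takeWhile (· ≠ '/')) = "users".toList then
        String.ofList (rest.takeWhile (· ≠ '/'))      -- rest.partition("/")[0]
      else pvBLoop rest
termination_by path.length
decreasing_by
  have h1 : (path.dropWhile (· ≠ '/')).length ≤ path.length := path.length_dropWhile_le _
  have h2 : (path.dropWhile (· ≠ '/')).length = rest.length + 1 := by rw [h]; simp
  omega

def extract_user_from_path_alt (file_path : String) : String :=
  let path := PySem.Str.replace file_path "\\" "/"
  if PySem.Str.isIn "config/systemprofile" (PySem.Str.lower path) then "SYSTEM"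
  else pvBLoop path.toList

-- ===== PRECONDITION & SPEC =====
def Spec_extract_user_from_path (file_path : String) (out : String) : Prop := out = extract_user_from_path_alt file_path
instance (file_path : String) (out : String) : Decidable (Spec_extract_user_from_path file_path out) := by unfold Spec_extract_user_from_path; infer_instance

-- ===== CLAIM (what is proved, stated in full; the proofs are below) =====
def Claim_equal_extract_user_from_path : Prop := ∀ (file_path : String), Dom_extract_user_from_path file_path → Spec_extract_user_from_path file_path (extract_user_from_path file_path)

-- ===== LEMMAS AND PROOFS =====

-- proof-only reference shape of split-on-'/' (one component, then recurse past the first '/')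
def pvS (cs : List Char) : List (List Char) :=
  match h : cs.dropWhile (· ≠ '/') with
  | [] => [cs]
  | _ :: r => cs.takeWhile (· ≠ '/') :: pvS r
termination_by cs.length
decreasing_by
  have h1 : (cs.dropWhile (· ≠ '/')).length ≤ cs.length := cs.length_dropWhile_le _
  have h2 : (cs.dropWhile (· ≠ '/')).length = r.length + 1 := by rw [h]; simp
  omega

theorem pvS_ne_nil (cs : List Char) : pvS cs ≠ [] := by
  rw [pvS.eq_def]; split <;> simp

theorem pvS_head (cs : List Char) :
    ∃ tl, pvS cs = cs.takeWhile (· ≠ '/') :: tl := by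
  rw [pvS.eq_def]
  split
  · rename_i h
    refine ⟨[], ?_⟩
    have := List.takeWhile_append_dropWhile (p := (· ≠ '/')) (l := cs)
    rw [h, List.append_nil] at this
    simpa using this.symm
  · exact ⟨_, rfl⟩

-- prepend chars to the first component
def pvConsHead (x : List Char) : List (List Char) → List (List Char)
  | [] => [x]
  | h :: t => (x ++ h) :: t

theorem pvConsHead_consHead (x y : List Char) (l : List (List Char)) :
    pvConsHead x (pvConsHead y l) = pvConsHead (x ++ y) l := by
  cases l <;> simp [pvConsHead]

theorem pvConsHead_nil_of_ne_nil (l : List (List Char)) (h : l ≠ []) :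
    pvConsHead [] l = l := by
  cases l
  · exact absurd rfl h
  · simp [pvConsHead]

-- clean unfolding lemmas for the two well-founded definitions
theorem pvS_of_drop_nil (cs : List Char) (h : cs.dropWhile (· ≠ '/') = []) :
    pvS cs = [cs] := by
  rw [pvS.eq_def]
  split
  · rfl
  · rename_i hd r h'
    rw [h] at h'; cases h'

theorem pvS_of_drop_cons (cs : List Char) (hd : Char) (r : List Char)
    (h : cs.dropWhile (· ≠ '/') = hd :: r) :
    pvS cs = cs.takeWhile (· ≠ '/') :: pvS r := by
  rw [pvS.eq_def]
  split
  · rename_i h'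
    rw [h] at h'; cases h'
  · rename_i hd' r' h'
    rw [h] at h'
    cases h'
    rfl

theorem pvBLoop_of_drop_nil (cs : List Char) (h : cs.dropWhile (· ≠ '/') = []) :
    pvBLoop cs = "Unknown" := by
  rw [pvBLoop.eq_def]
  split
  · rfl
  · rename_i hd r h'
    rw [h] at h'; cases h'

theorem pvBLoop_of_drop_cons (cs : List Char) (hd : Char) (r : List Char)
    (h : cs.dropWhile (· ≠ '/') = hd :: r) :
    pvBLoop cs =
      if PySem.Chars.lower (cs.takeWhile (· ≠ '/')) = "users".toList then
        String.ofList (r.takeWhile (· ≠ '/'))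
      else pvBLoop r := by
  rw [pvBLoop.eq_def]
  split
  · rename_i h'
    rw [h] at h'; cases h'
  · rename_i hd' r' h'
    rw [h] at h'
    cases h'
    rfl

theorem pvS_nil : pvS [] = [[]] :=
  pvS_of_drop_nil [] (by simp)

theorem pvS_cons_slash (rest : List Char) : pvS ('/' :: rest) = [] :: pvS rest := by
  rw [pvS_of_drop_cons ('/' :: rest) '/' rest (by simp)]
  simp

theorem pvS_cons_ne (c : Char) (rest : List Char) (hc : ¬ c = '/') :
    pvS (c :: rest) = pvConsHead [c] (pvS rest) := by
  cases h : rest.dropWhile (· ≠ '/') with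
  | nil =>
    have hcs : (c :: rest).dropWhile (· ≠ '/') = [] := by
      simp only [List.dropWhile_cons]
      rw [if_pos (by simp [hc])]
      exact h
    rw [pvS_of_drop_nil _ hcs, pvS_of_drop_nil _ h]
    simp [pvConsHead]
  | cons hd r =>
    have hcs : (c :: rest).dropWhile (· ≠ '/') = hd :: r := by
      simp only [List.dropWhile_cons]
      rw [if_pos (by simp [hc])]
      exact h
    rw [pvS_of_drop_cons _ _ _ hcs, pvS_of_drop_cons _ _ _ h]
    simp [pvConsHead, List.takeWhile, hc]

theorem pvGo_slash (fuel : Nat) :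
    ∀ (l cur : List Char) (accs : List (List Char)), l.length < fuel →
      PySem.Chars.splitOn.go ['/'] fuel l cur accs =
        accs.reverse ++ pvConsHead cur.reverse (pvS l) := by
  induction fuel with
  | zero => intro l cur accs h; omega
  | succ fuel ih =>
    intro l cur accs h
    match l with
    | [] =>
      rw [PySem.Chars.splitOn.go.eq_def]
      simp [pvS_nil, pvConsHead]
    | c :: rest =>
      rw [PySem.Chars.splitOn.go.eq_def]
      have hlen : rest.length < fuel := by simp at h; omega
      by_cases hc : c = '/'
      · subst hc
        have hpre : List.isPrefixOf ['/'] ('/' :: rest) = true := by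
          simp [List.isPrefixOf]
        simp only [hpre, if_true]
        rw [show List.drop (['/'] : List Char).length ('/' :: rest) = rest from rfl]
        rw [ih rest [] (cur.reverse :: accs) hlen]
        obtain ⟨tl, hS⟩ := pvS_head rest
        rw [pvS_cons_slash]
        simp [pvConsHead, hS]
      · have hpre : List.isPrefixOf ['/'] (c :: rest) = false := by
          simp [List.isPrefixOf]; exact fun h => absurd h.symm hc
        simp only [hpre, Bool.false_eq_true, if_false]
        rw [ih rest (c :: cur) accs hlen, pvS_cons_ne c rest hc,
          pvConsHead_consHead]
        simp

theorem pvSplitOn_eq_pvS (cs : List Char) :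
    PySem.Chars.splitOn cs ['/'] = pvS cs := by
  have h := pvGo_slash (cs.length + 1) cs [] [] (by omega)
  simpa [PySem.Chars.splitOn, pvConsHead_nil_of_ne_nil _ (pvS_ne_nil cs)] using h

-- A's inner loop, read on the suffix still to be scanned, is the adjacent-pair scan
def pvPairScan : List String → String
  | p :: q :: r => if PySem.Str.lower p = "users" then q else pvPairScan (q :: r)
  | _ => "Unknown"

theorem pvALoop_eq_pairScan (suf pre : List String) :
    pvALoop (pre ++ suf) (PySem.List.enumerate suf (pre.length : Int)) = pvPairScan suf := by
  induction suf generalizing pre with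
  | nil => simp [PySem.List.enumerate, pvALoop, pvPairScan]
  | cons p suf' ih =>
    rw [PySem.List.enumerate_cons]
    match suf' with
    | [] =>
      rw [pvALoop, if_neg]
      · simp [PySem.List.enumerate, pvALoop, pvPairScan]
      · rintro ⟨-, h2⟩
        simp at h2
    | q :: r =>
      rw [pvALoop]
      by_cases hu : PySem.Str.lower p = "users"
      · have hlt : (pre.length : Int) + 1 < (((pre ++ p :: q :: r).length : Nat) : Int) := by
          simp only [List.length_append, List.length_cons]
          push_cast
          omega
        rw [if_pos ⟨hu, hlt⟩]
        have hcast : (pre.length : Int) + 1 = ((pre.length + 1 : Nat) : Int) := by push_cast; ring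
        rw [hcast, PySem.List.pyGetD_natCast]
        simp [List.getD, pvPairScan, hu]
      · rw [if_neg (by rintro ⟨h1, -⟩; exact hu h1)]
        have := ih (pre ++ [p])
        simp only [List.append_assoc, List.cons_append, List.nil_append,
          List.length_append, List.length_cons, List.length_nil] at this
        rw [show ((pre.length : Int) + 1) = ((pre.length + 1 : Nat) : Int) by push_cast; ring]
        rw [show (pvPairScan (p :: q :: r)) = pvPairScan (q :: r) by simp [pvPairScan, hu]]
        exact this

theorem pvLower_ofList (l : List Char) :
    PySem.Str.lower (String.ofList l) = "users" ↔ PySem.Chars.lower l = "users".toList := by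
  constructor
  · intro h
    have := congrArg String.toList h
    simpa using this
  · intro h
    apply String.toList_inj.mp
    simpa using h

theorem pvPairScan_S_eq_bLoop (cs : List Char) :
    pvPairScan ((pvS cs).map String.ofList) = pvBLoop cs := by
  induction cs using pvBLoop.induct with
  | case1 cs h =>
    rw [pvS_of_drop_nil cs h, pvBLoop_of_drop_nil cs h]
    rfl
  | case2 cs hd rest h hcond =>
    rw [pvS_of_drop_cons cs hd rest h, pvBLoop_of_drop_cons cs hd rest h, if_pos hcond]
    obtain ⟨tl, hS⟩ := pvS_head rest
    rw [hS]
    simp only [List.map_cons]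
    rw [pvPairScan, if_pos ((pvLower_ofList _).mpr hcond)]
  | case3 cs hd rest h hcond ih =>
    rw [pvS_of_drop_cons cs hd rest h, pvBLoop_of_drop_cons cs hd rest h, if_neg hcond]
    obtain ⟨tl, hS⟩ := pvS_head rest
    rw [hS] at ih ⊢
    simp only [List.map_cons]
    rw [pvPairScan, if_neg (fun hu => hcond ((pvLower_ofList _).mp hu))]
    exact ih

-- ===== VERDICT (by name: the statement is the Claim_ definition above) =====
theorem extract_user_from_path_spec : Claim_equal_extract_user_from_path := by
  intro fp _
  unfold Spec_extract_user_from_path extract_user_from_path extract_user_from_path_alt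
  simp only []
  split
  · rfl
  · rw [pvSplitOn_eq_pvS]
    have h := pvALoop_eq_pairScan ((pvS (PySem.Str.replace fp "\\" "/").toList).map String.ofList) []
    simpa using h.trans (pvPairScan_S_eq_bLoop _)
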